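-- pv_equiv track=rewrite | github.com/Makistos/suomisf | app/route_helpers.py | get_join_changes
-- ===== SOURCE A (Python) =====
-- from typing import List, Dict, Any, Tuple, Set, Union
--
-- def get_join_changes(existing: Union[List[int], Set[int]], new: List[int]) -> Tuple[List[int], List[int]]:
--     to_add: List[int] = new
--     to_delete: List[int] = []
--
--     if existing:
--         for id in existing:
--             if id in new:
--                 to_add.remove(id)
--             else:
--                 to_delete.append(id)
--
--     return (to_add, to_delete)
-- ===== SOURCE B (Python) =====
-- def get_join_changes(existing, new):
--     # Counter-based two-pass version; mutates `new` in place like the original.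
--     avail = {}
--     for v in new:
--         avail[v] = avail.get(v, 0) + 1
--     removed = {}
--     to_delete = []
--     for v in existing:
--         if avail.get(v, 0) > 0:
--             avail[v] = avail.get(v, 0) - 1
--             removed[v] = removed.get(v, 0) + 1
--         else:
--             to_delete.append(v)
--     kept = []
--     for v in new:
--         if removed.get(v, 0) > 0:
--             removed[v] = removed.get(v, 0) - 1
--         else:
--             kept.append(v)
--     new[:] = kept
--     return (new, to_delete)
-- ===== Notes on version B (the rewrite author's own statement) =====
-- stated objective: faster
-- what changed: Replaces the per-element `in`-test and list.remove scans over the shrinking to_add list by one counter pass over new, one pass over existing decrementing availability, and a second pass over new that skips the consumed occurrences, written back with new[:].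
import Mathlib
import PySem

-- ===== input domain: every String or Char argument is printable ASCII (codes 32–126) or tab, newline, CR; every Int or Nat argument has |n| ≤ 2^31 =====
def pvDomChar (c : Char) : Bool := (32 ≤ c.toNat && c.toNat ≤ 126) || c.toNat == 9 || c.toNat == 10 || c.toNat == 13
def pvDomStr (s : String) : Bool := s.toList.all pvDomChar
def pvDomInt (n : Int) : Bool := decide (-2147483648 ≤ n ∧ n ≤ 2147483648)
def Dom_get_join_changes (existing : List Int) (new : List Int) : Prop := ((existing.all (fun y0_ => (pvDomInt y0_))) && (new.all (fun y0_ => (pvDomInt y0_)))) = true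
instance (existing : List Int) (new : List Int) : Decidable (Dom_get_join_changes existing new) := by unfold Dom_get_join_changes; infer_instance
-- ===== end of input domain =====

-- B replaces A's quadratic membership/remove scans with a counter and two linear passes.
-- Both Pythons mutate `new` in place (A via remove, B via new[:] = kept); the equivalence
-- proved here is about the returned pair, which in both is (the mutated new, to_delete).

-- ===== PORT A =====
-- loop body of A: `if id in to_add: to_add.remove(id) else: to_delete.append(id)`;
-- remove? is guarded by contains, so getD never takes its default (faithful to Python,
-- where list.remove only raises when the value is absent).
def pvAStep (s : List Int × List Int) (id : Int) : List Int × List Int :=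
  if s.1.contains id then ((PySem.List.remove? s.1 id).getD s.1, s.2)
  else (s.1, s.2 ++ [id])

def get_join_changes (existing : List Int) (new : List Int) : List Int × List Int :=
  let init : List Int × List Int := (new, [])
  if existing ≠ [] then existing.foldl pvAStep init else init

-- ===== PORT B =====
-- avail[v] = avail.get(v, 0) + 1 counting pass
def pvCountStep (d : PySem.Dict Int Int) (v : Int) : PySem.Dict Int Int :=
  d.insert v (d.getD v 0 + 1)

-- pass over existing: consume availability (recording it in removed) or delete
def pvBStep (s : PySem.Dict Int Int × PySem.Dict Int Int × List Int) (v : Int) :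
    PySem.Dict Int Int × PySem.Dict Int Int × List Int :=
  if s.1.getD v 0 > 0 then
    (s.1.insert v (s.1.getD v 0 - 1), s.2.1.insert v (s.2.1.getD v 0 + 1), s.2.2)
  else (s.1, s.2.1, s.2.2 ++ [v])

-- second pass over new: skip the first removed[v] occurrences of each v
def pvKeepStep (s : PySem.Dict Int Int × List Int) (v : Int) : PySem.Dict Int Int × List Int :=
  if s.1.getD v 0 > 0 then (s.1.insert v (s.1.getD v 0 - 1), s.2)
  else (s.1, s.2 ++ [v])

def get_join_changes_alt (existing : List Int) (new : List Int) : List Int × List Int :=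
  let avail := new.foldl pvCountStep PySem.Dict.empty
  let s := existing.foldl pvBStep (avail, PySem.Dict.empty, [])
  let k := new.foldl pvKeepStep (s.2.1, [])
  (k.2, s.2.2)

-- ===== PRECONDITION & SPEC =====
def Spec_get_join_changes (existing : List Int) (new : List Int) (out : List Int × List Int) : Prop := out = get_join_changes_alt existing new
instance (existing : List Int) (new : List Int) (out : List Int × List Int) : Decidable (Spec_get_join_changes existing new out) := by unfold Spec_get_join_changes; infer_instance

-- ===== CLAIM (what is proved, stated in full; the proofs are below) =====
def Claim_equal_get_join_changes : Prop := ∀ (existing : List Int) (new : List Int), Dom_get_join_changes existing new → Spec_get_join_changes existing new (get_join_changes existing new)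

-- ===== LEMMAS AND PROOFS =====

-- `keptF f l` drops, for each value v, the first (f v) occurrences of v from l.
def keptF (f : Int → Int) : List Int → List Int
  | [] => []
  | v :: t => if f v > 0 then keptF (Function.update f v (f v - 1)) t else v :: keptF f t

theorem keptF_zero (l : List Int) (f : Int → Int) (h : ∀ v, f v = 0) : keptF f l = l := by
  induction l with
  | nil => rfl
  | cons v t ih => simp [keptF, h v, ih]

theorem keep_fold (l : List Int) (r : PySem.Dict Int Int) (acc : List Int) :
    (l.foldl pvKeepStep (r, acc)).2 = acc ++ keptF (fun v => r.getD v 0) l := by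
  induction l generalizing r acc with
  | nil => simp [keptF]
  | cons v t ih =>
    by_cases h : r.getD v 0 > 0
    · have hfun : (fun v' => (r.insert v (r.getD v 0 - 1)).getD v' 0)
          = Function.update (fun v' => r.getD v' 0) v (r.getD v 0 - 1) := by
        funext v'
        by_cases hv : v' = v <;>
          simp [PySem.Dict.getD_insert, hv, Function.update]
      simp only [List.foldl_cons, pvKeepStep, if_pos h, keptF]
      rw [ih, hfun]
    · simp only [List.foldl_cons, pvKeepStep, if_neg h, keptF]
      rw [ih]
      simp

theorem erase_keptF (l : List Int) (f : Int → Int) (h0 : ∀ v, 0 ≤ f v) (v : Int)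
    (hv : v ∈ keptF f l) :
    (keptF f l).erase v = keptF (Function.update f v (f v + 1)) l := by
  induction l generalizing f with
  | nil => simp [keptF] at hv
  | cons w t ih =>
    by_cases hw : f w > 0
    · have hw' : (Function.update f v (f v + 1)) w > 0 := by
        rcases eq_or_ne w v with hwv | hwv
        · subst hwv; have := h0 w; simp [Function.update]; omega
        · simpa [Function.update, hwv] using hw
      have hfun : Function.update (Function.update f v (f v + 1)) w
            ((Function.update f v (f v + 1)) w - 1)
          = Function.update (Function.update f w (f w - 1)) v
            ((Function.update f w (f w - 1)) v + 1) := by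
        funext x
        rcases eq_or_ne w v with hwv | hwv
        · subst hwv
          simp only [Function.update_apply]
          split_ifs <;> omega
        · simp only [Function.update_apply]
          split_ifs <;> omega
      simp only [keptF, if_pos hw, if_pos hw'] at hv ⊢
      rw [ih _ (fun x => by
            by_cases hx : x = w
            · subst hx; simp [Function.update]; omega
            · simpa [Function.update, hx] using h0 x) hv, hfun]
    · have hw0 : f w = 0 := by have := h0 w; omega
      by_cases hwv : w = v
      · subst hwv
        have hpos : (Function.update f w (f w + 1)) w > 0 := by
          simp [Function.update]; omega
        have hfun : Function.update (Function.update f w (f w + 1)) w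
              ((Function.update f w (f w + 1)) w - 1) = f := by
          funext x
          by_cases hx : x = w
          · subst hx; simp [Function.update]
          · simp [Function.update, hx]
        simp only [keptF, if_neg hw, if_pos hpos, hfun]
        simp
      · have hne : (Function.update f v (f v + 1)) w = f w := by
          simp [Function.update, hwv]
        simp only [keptF, if_neg hw] at hv ⊢
        rw [if_neg (by omega : ¬ (Function.update f v (f v + 1)) w > 0)]
        have hv' : v ∈ keptF f t := by
          rcases List.mem_cons.1 hv with h | h
          · exact absurd h.symm hwv
          · exact h
        rw [List.erase_cons_tail (by simpa using hwv), ih f h0 hv']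

theorem main_loop (ex : List Int) (new : List Int) (f : Int → Int)
    (avail removed : PySem.Dict Int Int) (td : List Int)
    (h0 : ∀ v, 0 ≤ f v)
    (hrm : ∀ v, removed.getD v 0 = f v)
    (hav : ∀ v, avail.getD v 0 = ((keptF f new).count v : Int)) :
    ex.foldl pvAStep (keptF f new, td)
      = (keptF (fun v => (ex.foldl pvBStep (avail, removed, td)).2.1.getD v 0) new,
         (ex.foldl pvBStep (avail, removed, td)).2.2) := by
  induction ex generalizing f avail removed td with
  | nil =>
    simp only [List.foldl_nil]
    congr 1
    congr 1
    funext v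
    exact (hrm v).symm
  | cons id rest ih =>
    by_cases hc : id ∈ keptF f new
    · have hcnt : 0 < (keptF f new).count id := List.count_pos_iff.2 hc
      have havpos : avail.getD id 0 > 0 := by rw [hav id]; exact_mod_cast hcnt
      have herase : (keptF f new).erase id
          = keptF (Function.update f id (f id + 1)) new := erase_keptF new f h0 id hc
      have hA : pvAStep (keptF f new, td) id
          = (keptF (Function.update f id (f id + 1)) new, td) := by
        simp only [pvAStep, List.contains_iff_mem.2 hc, if_pos]
        rw [PySem.List.remove?_eq_some_erase _ _ hc]
        simp [herase]
      have hB : pvBStep (avail, removed, td) id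
          = (avail.insert id (avail.getD id 0 - 1), removed.insert id (removed.getD id 0 + 1), td) := by
        simp [pvBStep, havpos]
      rw [List.foldl_cons, List.foldl_cons, hA, hB]
      apply ih
      · intro v
        by_cases hv : v = id <;> simp [Function.update, hv]
        · exact le_trans (h0 id) (by omega)
        · exact h0 v
      · intro v
        rw [PySem.Dict.getD_insert]
        by_cases hv : v = id
        · subst hv; simp [Function.update, hrm v]
        · simp [hv, Function.update, hrm v]
      · intro v
        rw [PySem.Dict.getD_insert, ← herase]
        by_cases hv : v = id
        · subst hv
          rw [if_pos rfl, hav v, List.count_erase_self]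
          push_cast [Nat.cast_sub (by omega : 1 ≤ (keptF f new).count v)]
          ring
        · rw [if_neg hv, hav v, List.count_erase_of_ne hv]
    · have havneg : ¬ avail.getD id 0 > 0 := by
        rw [hav id]
        have : (keptF f new).count id = 0 := by simpa using List.count_eq_zero.2 hc
        simp [this]
      have hA : pvAStep (keptF f new, td) id = (keptF f new, td ++ [id]) := by
        simp [pvAStep, hc]
      have hB : pvBStep (avail, removed, td) id = (avail, removed, td ++ [id]) := by
        simp [pvBStep, havneg]
      rw [List.foldl_cons, List.foldl_cons, hA, hB]
      exact ih f avail removed (td ++ [id]) h0 hrm hav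

-- ===== VERDICT (by name: the statement is the Claim_ definition above) =====
theorem get_join_changes_spec : Claim_equal_get_join_changes := by
  intro existing new _
  unfold Spec_get_join_changes get_join_changes get_join_changes_alt
  have hstart : (new, ([] : List Int)) = (keptF (fun _ => 0) new, ([] : List Int)) := by
    rw [keptF_zero new _ (fun _ => rfl)]
  have hif : (if existing ≠ [] then existing.foldl pvAStep (new, []) else (new, [])) =
      existing.foldl pvAStep (new, []) := by
    cases existing <;> simp
  rw [hif]
  show List.foldl pvAStep (new, []) existing
      = ((new.foldl pvKeepStep
            ((existing.foldl pvBStep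
              (new.foldl pvCountStep PySem.Dict.empty, PySem.Dict.empty, [])).2.1, [])).2,
         (existing.foldl pvBStep
            (new.foldl pvCountStep PySem.Dict.empty, PySem.Dict.empty, [])).2.2)
  rw [hstart, main_loop existing new (fun _ => 0)
      (new.foldl pvCountStep PySem.Dict.empty) PySem.Dict.empty []
      (fun _ => le_refl 0)
      (fun v => by simp [PySem.Dict.getD_empty])
      (fun v => by
        rw [keptF_zero new _ (fun _ => rfl)]
        simpa [pvCountStep] using PySem.Dict.getD_foldl_insert_add_one new PySem.Dict.empty v)]
  rw [keep_fold]
  simp
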